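-- pv_equiv track=rewrite | github.com/kh277/BOJ | 백준/Gold/1612. 가지고 노는 1/가지고 노는 1.py | solve
-- ===== SOURCE A (Python) =====
-- def solve(N):
--     if N % 2 == 0 or N % 5 == 0:
--         return -1
--
--     count = 1
--     curNum = 1
--     while True:
--         if curNum % N == 0:
--             return count
--         curNum = (curNum % N)*10 + 1
--         count += 1
-- ===== SOURCE B (Python) =====
-- def solve(N):
--     if N % 2 == 0 or N % 5 == 0:
--         return -1
--     # N | repunit(k) iff 10^k == 1 (mod 9*|N|): scan k = 1..m for the
--     # multiplicative order of 10 modulo m = 9*|N| (guaranteed to exist there).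
--     m = 9 * abs(N)
--     p = 10 % m
--     for k in range(1, m + 1):
--         if p == 1:
--             return k
--         p = p * 10 % m
-- ===== Notes on version B (the rewrite author's own statement) =====
-- stated objective: alternative
-- what changed: B finds the multiplicative order of 10 modulo 9*|N| by scanning a bounded range k=1..9|N| and stepping a power of 10, instead of A's unbounded while-loop accumulating repunit residues modulo N; modulus, loop state, update and stopping test all differ.
import Mathlib
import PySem

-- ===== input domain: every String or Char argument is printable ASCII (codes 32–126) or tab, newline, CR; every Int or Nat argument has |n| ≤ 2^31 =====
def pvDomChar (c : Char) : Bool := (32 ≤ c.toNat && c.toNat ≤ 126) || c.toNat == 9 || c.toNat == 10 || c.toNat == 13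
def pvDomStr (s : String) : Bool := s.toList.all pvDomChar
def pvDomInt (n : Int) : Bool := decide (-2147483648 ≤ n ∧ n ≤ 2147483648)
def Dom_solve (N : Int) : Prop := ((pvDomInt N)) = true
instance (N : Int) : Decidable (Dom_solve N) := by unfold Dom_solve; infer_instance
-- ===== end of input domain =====

-- B replaces A's unbounded repunit-residue while-loop (mod N) by a bounded scan over
-- range(1, 9|N|+1) for the multiplicative order of 10 modulo 9*|N|: an alternative
-- algorithm of the same cost.

-- ===== PORT A =====
-- A's 'while True' loop, made structural with fuel; 9*|N| steps provably never run out for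
-- inputs A terminates on (the tester checks faithfulness), the fuel-0 branch is unreachable junk.
def solveLoop (N : Int) (fuel : Nat) (count curNum : Int) : Int :=
  match fuel with
  | 0 => -2
  | f + 1 =>
    if PySem.Int.mod curNum N = 0 then count
    else solveLoop N f (count + 1) ((PySem.Int.mod curNum N) * 10 + 1)

def solve (N : Int) : Int :=
  if PySem.Int.mod N 2 = 0 ∨ PySem.Int.mod N 5 = 0 then -1
  else solveLoop N (9 * N.natAbs) 1 1

-- ===== PORT B =====
-- One fold step of B's for-loop: the state is (early-return value if any, current power p);
-- once the return value is set the remaining iterations leave the state unchanged.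
def altStep (m : Int) (st : Option Int × Int) (k : Int) : Option Int × Int :=
  match st with
  | (some r, p) => (some r, p)
  | (none, p) => if p = 1 then (some k, p) else (none, PySem.Int.mod (p * 10) m)

def solve_alt (N : Int) : Int :=
  if PySem.Int.mod N 2 = 0 ∨ PySem.Int.mod N 5 = 0 then -1
  else
    let m : Int := 9 * |N|
    match ((PySem.List.pyRange 1 (m + 1) 1).foldl (altStep m) (none, PySem.Int.mod 10 m)).1 with
    | some r => r
    | none => -2

-- ===== PRECONDITION & SPEC =====
def Spec_solve (N : Int) (out : Int) : Prop := out = solve_alt N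
instance (N : Int) (out : Int) : Decidable (Spec_solve N out) := by unfold Spec_solve; infer_instance

-- ===== CLAIM (what is proved, stated in full; the proofs are below) =====
def Claim_equal_solve : Prop := ∀ (N : Int), Dom_solve N → Spec_solve N (solve N)

-- ===== LEMMAS AND PROOFS =====

-- Once B's fold has an early-return value it is absorbing.
theorem foldl_altStep_some (m r p : Int) :
    ∀ (L : List Int), L.foldl (altStep m) (some r, p) = (some r, p) := by
  intro L
  induction L with
  | nil => rfl
  | cons x xs ih => simpa [List.foldl, altStep] using ih

-- Lockstep invariant linking the two loops: 9*curNum ≡ p - 1 (mod 9|N|), 0 ≤ p < 9|N|;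
-- A's remaining fuel equals the length of B's remaining range, whose head is A's count.
theorem loop_eq (N : Int) (hN : N ≠ 0) :
    ∀ (fuel : Nat) (count curNum p : Int),
      0 ≤ p → p < 9 * |N| → (9 * |N|) ∣ (9 * curNum - (p - 1)) →
      solveLoop N fuel count curNum =
        (match ((PySem.List.pyRange count (count + fuel) 1).foldl (altStep (9 * |N|))
            (none, p)).1 with
         | some r => r
         | none => -2) := by
  have hm : (0:Int) < 9 * |N| := by positivity
  have hm9 : (9:Int) ≤ 9 * |N| := by
    have h1 : (1:Int) ≤ |N| := Int.one_le_abs hN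
    linarith
  intro fuel
  induction fuel with
  | zero =>
    intro count curNum p _ _ _
    rw [PySem.List.pyRange_one_eq_nil (by simp)]
    rfl
  | succ f ih =>
    intro count curNum p hp0 hpm hdvd
    have htest : (PySem.Int.mod curNum N = 0) ↔ (p = 1) := by
      rw [PySem.Int.mod_eq_zero_iff_dvd]
      constructor
      · rintro ⟨c, hc⟩
        have h9 : (9 * |N|) ∣ (9 * curNum) := by
          rcases abs_choice N with h | h
          · exact ⟨c, by rw [hc, h]; ring⟩
          · exact ⟨-c, by rw [hc]; rw [h]; ring⟩
        have h1 : (9 * |N|) ∣ (p - 1) := by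
          have := dvd_sub h9 hdvd
          simpa using this
        rcases h1 with ⟨c1, hc1⟩
        rcases lt_trichotomy c1 0 with hcneg | hc0 | hcpos
        · have hle : 9 * |N| * c1 ≤ -(9 * |N|) := by nlinarith
          linarith
        · rw [hc0, mul_zero] at hc1; linarith
        · have hge : 9 * |N| ≤ 9 * |N| * c1 := by nlinarith
          linarith
      · intro hp1
        subst hp1
        have h9 : (9 * |N|) ∣ (9 * curNum) := by simpa using hdvd
        rcases h9 with ⟨c, hc⟩
        have habs : |N| ∣ curNum := ⟨c, by linarith⟩
        exact (abs_dvd N curNum).mp habs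
    have hcons : PySem.List.pyRange count (count + (f + 1 : Nat)) 1
        = count :: PySem.List.pyRange (count + 1) ((count + 1) + f) 1 := by
      rw [PySem.List.pyRange_one_cons (by push_cast; omega)]
      congr 1
      push_cast; ring_nf
    rw [hcons]
    simp only [solveLoop, List.foldl]
    by_cases h : PySem.Int.mod curNum N = 0
    · rw [if_pos h]
      have : altStep (9 * |N|) (none, p) count = (some count, p) := by
        simp [altStep, htest.mp h]
      rw [this, foldl_altStep_some]
    · rw [if_neg h]
      have hp1 : ¬ p = 1 := fun hp1 => h (htest.mpr hp1)
      have hstep : altStep (9 * |N|) (none, p) count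
          = (none, PySem.Int.mod (p * 10) (9 * |N|)) := by
        simp [altStep, hp1]
      rw [hstep]
      apply ih
      · exact PySem.Int.mod_nonneg _ hm
      · exact PySem.Int.mod_lt _ hm
      · have hmodc : N ∣ (PySem.Int.mod curNum N - curNum) := by
          have := PySem.Int.floordiv_mul_add_mod curNum N
          exact ⟨-(PySem.Int.floordiv curNum N), by linarith [this]⟩
        have hmodc' : (9 * |N|) ∣ (9 * (PySem.Int.mod curNum N) - 9 * curNum) := by
          rcases hmodc with ⟨c, hc⟩
          rcases abs_choice N with h' | h'
          · exact ⟨c, by rw [h']; linarith [hc]⟩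
          · exact ⟨-c, by rw [h']; ring_nf; nlinarith [hc]⟩
        have hmodp : (9 * |N|) ∣ (PySem.Int.mod (p * 10) (9 * |N|) - p * 10) := by
          have := PySem.Int.floordiv_mul_add_mod (p * 10) (9 * |N|)
          exact ⟨-(PySem.Int.floordiv (p * 10) (9 * |N|)), by linarith [this]⟩
        have key : 9 * ((PySem.Int.mod curNum N) * 10 + 1)
            - (PySem.Int.mod (p * 10) (9 * |N|) - 1)
            = 10 * (9 * (PySem.Int.mod curNum N) - 9 * curNum)
              + 10 * (9 * curNum - (p - 1))
              - (PySem.Int.mod (p * 10) (9 * |N|) - p * 10) := by ring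
        rw [key]
        exact dvd_sub (dvd_add (Dvd.dvd.mul_left hmodc' 10) (Dvd.dvd.mul_left hdvd 10)) hmodp

-- ===== VERDICT (by name: the statement is the Claim_ definition above) =====
theorem solve_spec : Claim_equal_solve := by
  intro N _
  unfold Spec_solve solve solve_alt
  by_cases hg : PySem.Int.mod N 2 = 0 ∨ PySem.Int.mod N 5 = 0
  · rw [if_pos hg, if_pos hg]
  · rw [if_neg hg, if_neg hg]
    have hN : N ≠ 0 := by
      intro h; subst h; exact hg (Or.inl (by decide))
    have hm : (0:Int) < 9 * |N| := by positivity
    have hrange : (9 * |N| + 1 : Int) = 1 + (9 * N.natAbs : Nat) := by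
      push_cast [Int.natCast_natAbs]; ring
    show solveLoop N (9 * N.natAbs) 1 1 =
      (match ((PySem.List.pyRange 1 ((9 * |N|) + 1) 1).foldl (altStep (9 * |N|))
          (none, PySem.Int.mod 10 (9 * |N|))).1 with
       | some r => r
       | none => -2)
    rw [show (PySem.List.pyRange 1 (9 * |N| + 1) 1)
        = PySem.List.pyRange 1 (1 + (9 * N.natAbs : Nat)) 1 by rw [hrange]]
    rw [← loop_eq N hN (9 * N.natAbs) 1 1 (PySem.Int.mod 10 (9 * |N|))
        (PySem.Int.mod_nonneg _ hm) (PySem.Int.mod_lt _ hm)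
        ⟨PySem.Int.floordiv 10 (9 * |N|), by
          linear_combination -(PySem.Int.floordiv_mul_add_mod 10 (9 * |N|))⟩]
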